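-- pv_equiv track=rewrite | github.com/MarcinSkrobczynski/Codility-Lessons | solutions/lesson_3_TapeEquilibrium.py | solution
-- ===== SOURCE A (Python) =====
-- def solution(a: list) -> int:
--     left = sum(a[:1])
--     right = sum(a[1:])
--     min_diff = abs(right - left)
--
--     for i in range(1, len(a) - 1):
--         left += a[i]
--         right -= a[i]
--         min_diff = min(abs(right - left), min_diff)
--
--     return min_diff
-- ===== SOURCE B (Python) =====
-- def solution(a: list) -> int:
--     # Sort the doubled prefix sums and binary-search for the total:
--     # the best split is the prefix whose doubled sum is closest to total,
--     # found as a neighbour of the insertion point instead of a min-scan.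
--     total = sum(a)
--     qs = []
--     s = 0
--     for x in a[:-1]:
--         s += x
--         qs.append(2 * s)
--     if not qs:
--         return abs(total)
--     qs.sort()
--     lo, hi = 0, len(qs)
--     while lo < hi:  # hand-written bisect_left(qs, total)
--         mid = (lo + hi) // 2
--         if qs[mid] < total:
--             lo = mid + 1
--         else:
--             hi = mid
--     if lo == len(qs):
--         return total - qs[-1]
--     if lo == 0:
--         return qs[0] - total
--     return min(qs[lo] - total, total - qs[lo - 1])
-- ===== Notes on version B (the rewrite author's own statement) =====
-- stated objective: alternative
-- what changed: Instead of A's running left/right min-scan over split points, B sorts the doubled prefix sums and binary-searches (hand-written bisect_left) for the total, taking the closer of the two neighbours of the insertion point as the answer.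
import Mathlib
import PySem

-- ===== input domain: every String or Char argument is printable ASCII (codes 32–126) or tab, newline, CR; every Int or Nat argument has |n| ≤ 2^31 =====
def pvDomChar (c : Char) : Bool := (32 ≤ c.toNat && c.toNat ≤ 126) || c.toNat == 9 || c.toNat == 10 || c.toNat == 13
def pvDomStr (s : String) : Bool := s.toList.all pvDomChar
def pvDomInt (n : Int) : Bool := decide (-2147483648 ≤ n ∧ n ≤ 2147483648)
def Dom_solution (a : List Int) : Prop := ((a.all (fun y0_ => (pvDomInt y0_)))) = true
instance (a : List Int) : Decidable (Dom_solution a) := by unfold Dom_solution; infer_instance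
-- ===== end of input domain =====

-- B sorts the doubled prefix sums and binary-searches (hand-written bisect_left loop) for the
-- total, taking the closer neighbour of the insertion point, instead of A's running min-scan.
-- ===== PORT A =====
def solution (a : List Int) : Int :=
  let left := (PySem.List.slice a none (some 1)).sum
  let right := (PySem.List.slice a (some 1) none).sum
  let minDiff := |right - left|
  let st := (PySem.List.pyRange 1 ((a.length : Int) - 1) 1).foldl
    (fun (st : Int × Int × Int) i =>
      let ai := PySem.List.pyGetD a i 0
      let left := st.1 + ai
      let right := st.2.1 - ai
      (left, right, min |right - left| st.2.2))
    (left, right, minDiff)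
  st.2.2

-- ===== PORT B =====
-- the three tail returns of Source B after the sort and the binary search
def pvPick (total : Int) (qs : List Int) : Int :=
  -- Source B's hand-written while-loop is literally bisect_left's loop (lo/hi halving);
  -- it is ported as PySem.List.bisectLeft, which is that same loop.
  let lo := PySem.List.bisectLeft qs total
  if lo = qs.length then total - PySem.List.pyGetD qs (-1) 0
  else if lo = 0 then PySem.List.pyGetD qs 0 0 - total
  else min (PySem.List.pyGetD qs (lo : Int) 0 - total) (total - PySem.List.pyGetD qs ((lo : Int) - 1) 0)

def solution_alt (a : List Int) : Int :=
  let total := a.sum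
  let st := (PySem.List.slice a none (some (-1))).foldl
    (fun (st : Int × List Int) x => (st.1 + x, st.2 ++ [2 * (st.1 + x)]))
    (0, ([] : List Int))
  if st.2 = [] then |total|
  else pvPick total (PySem.List.sorted st.2 (fun q => q) false)

-- ===== PRECONDITION & SPEC =====
def Spec_solution (a : List Int) (out : Int) : Prop := out = solution_alt a
instance (a : List Int) (out : Int) : Decidable (Spec_solution a out) := by unfold Spec_solution; infer_instance

-- ===== CLAIM (what is proved, stated in full; the proofs are below) =====
def Claim_equal_solution : Prop := ∀ (a : List Int), Dom_solution a → Spec_solution a (solution a)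

-- ===== LEMMAS AND PROOFS =====

-- the doubled prefix sums of l starting from accumulated sum p
def pvQ : List Int → Int → List Int
  | [], _ => []
  | x :: l, p => 2 * (p + x) :: pvQ l (p + x)

theorem pv_build (l : List Int) (p : Int) (acc : List Int) :
    (l.foldl (fun (st : Int × List Int) x => (st.1 + x, st.2 ++ [2 * (st.1 + x)])) (p, acc)).2
      = acc ++ pvQ l p := by
  induction l generalizing p acc with
  | nil => simp [pvQ]
  | cons x l ih => simp [pvQ, ih (p + x) (acc ++ [2 * (p + x)])]

theorem perm_min? (l1 l2 : List Int) (h : l1.Perm l2) : l1.min? = l2.min? := by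
  rcases h1 : l1.min? with _ | m
  · rw [List.min?_eq_none_iff] at h1; subst h1
    have h2 : l2 = [] := h.symm.eq_nil
    simp [h2]
  · rw [List.min?_eq_some_iff] at h1
    rw [eq_comm, List.min?_eq_some_iff]
    exact ⟨h.mem_iff.mp h1.1, fun b hb => h1.2 b (h.mem_iff.mpr hb)⟩

-- A's triple fold equals a min-fold over the doubled prefix sums
theorem pv_key2 (l : List Int) (total p m : Int) :
    (l.foldl (fun (st : Int × Int × Int) z =>
        (st.1 + z, st.2.1 - z, min |st.2.1 - z - (st.1 + z)| st.2.2)) (p, total - p, m)).2.2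
      = (pvQ l p).foldl (fun m q => min m |total - q|) m := by
  induction l generalizing p m with
  | nil => simp [pvQ]
  | cons x l ih =>
    simp only [List.foldl_cons, pvQ]
    have h1 : total - p - x = total - (p + x) := by ring
    have h2 : min |total - p - x - (p + x)| m = min m |total - 2 * (p + x)| := by
      have : |total - p - x - (p + x)| = |total - 2 * (p + x)| := by ring_nf
      rw [this]; omega
    rw [h2, h1]
    exact ih (p + x) _

theorem pv_fold_map (total : Int) (l : List Int) (m : Int) :
    (l.foldl (fun m q => min m |total - q|) m)
      = ((l.map (fun q => |total - q|)).foldl min m) := by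
  rw [List.foldl_map]

-- characterisation of A: the min (with no-split fallback |sum|) of |total - q| over pvQ a.dropLast 0
theorem A_char (a : List Int) :
    solution a = (((pvQ a.dropLast 0).map (fun q => |a.sum - q|)).min?).getD |a.sum| := by
  match a with
  | [] => decide
  | [x] =>
    simp [solution, pvQ, PySem.List.slice, PySem.List.clampIdx]
  | x :: y :: ys =>
    have hA : solution (x :: y :: ys)
        = ((((x :: y :: ys).dropLast).drop 1).foldl
            (fun (st : Int × Int × Int) z =>
              (st.1 + z, st.2.1 - z, min |st.2.1 - z - (st.1 + z)| st.2.2))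
            (x, y + ys.sum, |y + ys.sum - x|)).2.2 := by
      simp only [solution]
      have hlen : ((x :: y :: ys).length : Int) - 1
          = (((x :: y :: ys).dropLast).length : Int) := by
        simp [List.length_dropLast]
      rw [hlen]
      have hcongr : ∀ (init : Int × Int × Int),
          List.foldl (fun (st : Int × Int × Int) i =>
              (st.1 + PySem.List.pyGetD (x :: y :: ys) i 0,
               st.2.1 - PySem.List.pyGetD (x :: y :: ys) i 0,
               min |st.2.1 - PySem.List.pyGetD (x :: y :: ys) i 0
                    - (st.1 + PySem.List.pyGetD (x :: y :: ys) i 0)| st.2.2))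
            init (PySem.List.pyRange 1 (((x :: y :: ys).dropLast).length : Int) 1)
          = List.foldl (fun (st : Int × Int × Int) z =>
              (st.1 + z, st.2.1 - z, min |st.2.1 - z - (st.1 + z)| st.2.2))
            init (((x :: y :: ys).dropLast).drop 1) := by
        intro init
        have hsw : ∀ (acc : Int × Int × Int), ∀ i ∈ PySem.List.pyRange 1 (((x :: y :: ys).dropLast).length : Int) 1,
            (acc.1 + PySem.List.pyGetD (x :: y :: ys) i 0,
             acc.2.1 - PySem.List.pyGetD (x :: y :: ys) i 0,
             min |acc.2.1 - PySem.List.pyGetD (x :: y :: ys) i 0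
                  - (acc.1 + PySem.List.pyGetD (x :: y :: ys) i 0)| acc.2.2)
            = (acc.1 + PySem.List.pyGetD ((x :: y :: ys).dropLast) i 0,
               acc.2.1 - PySem.List.pyGetD ((x :: y :: ys).dropLast) i 0,
               min |acc.2.1 - PySem.List.pyGetD ((x :: y :: ys).dropLast) i 0
                    - (acc.1 + PySem.List.pyGetD ((x :: y :: ys).dropLast) i 0)| acc.2.2) := by
          intro acc i hi
          have hi' := PySem.List.mem_pyRange_one.1 hi
          have hlt : i.toNat < ((x :: y :: ys).dropLast).length := by omega
          have h0 : PySem.List.pyGetD (x :: y :: ys) i 0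
              = PySem.List.pyGetD ((x :: y :: ys).dropLast) i 0 := by
            rw [PySem.List.pyGetD_of_nonneg _ _ (by omega),
                PySem.List.pyGetD_of_nonneg _ _ (by omega)]
            have hlt2 : i.toNat < (x :: y :: ys).length := by
              simp [List.length_dropLast] at hlt ⊢; omega
            rw [List.getD_eq_getElem _ _ hlt2, List.getD_eq_getElem _ _ hlt]
            exact (List.getElem_dropLast (xs := x :: y :: ys) hlt).symm
          rw [h0]
        rw [PySem.List.foldl_congr_mem _ _ _ init hsw]
        have := PySem.List.foldl_pyRange_pyGetD' ((x :: y :: ys).dropLast) (0 : Int)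
          (fun (st : Int × Int × Int) z =>
              (st.1 + z, st.2.1 - z, min |st.2.1 - z - (st.1 + z)| st.2.2))
          init (by omega : (0:Int) ≤ 1)
        simpa using this
      rw [hcongr]
      simp [PySem.List.slice_to _ (show (0:Int) ≤ 1 by omega), PySem.List.slice_from_one]
    have hdrop : (((x :: y :: ys).dropLast).drop 1) = (y :: ys).dropLast := by
      simp
    rw [hA, hdrop]
    have key := pv_key2 ((y :: ys).dropLast) ((x :: y :: ys).sum) x (|y + ys.sum - x|)
    rw [show (x :: y :: ys).sum - x = y + ys.sum by simp only [List.sum_cons]; ring] at key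
    rw [key, pv_fold_map]
    have hq : pvQ ((x :: y :: ys).dropLast) 0 = 2 * x :: pvQ ((y :: ys).dropLast) x := by
      rw [List.dropLast_cons₂, pvQ, zero_add]
    rw [hq]
    simp only [List.map_cons, List.min?]
    rw [show |y + ys.sum - x| = |(x :: y :: ys).sum - 2 * x| by
      rw [show (x :: y :: ys).sum - 2 * x = y + ys.sum - x by simp only [List.sum_cons]; ring]]
    simp

theorem getD_neg_one (qs : List Int) (h : 0 < qs.length) :
    PySem.List.pyGetD qs (-1) 0 = qs[qs.length - 1]'(by omega) := by
  simp only [PySem.List.pyGetD, PySem.List.pyGet?, PySem.List.pyIdx?]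
  rw [if_neg (by omega), if_pos (by omega)]
  simp only [Option.bind_some]
  rw [List.getElem?_eq_getElem (by omega)]
  simp

theorem getD_nat (qs : List Int) (lo : Nat) (h : lo < qs.length) :
    PySem.List.pyGetD qs (lo : Int) 0 = qs[lo] := by
  rw [PySem.List.pyGetD_of_nonneg _ _ (by omega)]
  rw [List.getD_eq_getElem _ _ (by simpa using h)]
  simp

theorem getD_pred (qs : List Int) (lo : Nat) (h0 : 0 < lo) (h : lo ≤ qs.length) :
    PySem.List.pyGetD qs ((lo : Int) - 1) 0 = qs[lo - 1]'(by omega) := by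
  rw [PySem.List.pyGetD_of_nonneg _ _ (by omega)]
  rw [List.getD_eq_getElem _ _ (by omega)]
  congr 1; omega

-- B's pick is the min of |total - q| over a nonempty list, via the sorted order
theorem pick_min (total : Int) (qs0 : List Int) (h : qs0 ≠ []) :
    ((qs0.map (fun q => |total - q|)).min?)
      = some (pvPick total (PySem.List.sorted qs0 (fun q => q) false)) := by
  set qs := PySem.List.sorted qs0 (fun q => q) false with hqsdef
  have hperm : qs.Perm qs0 := PySem.List.sorted_perm qs0 (fun q => q) false
  rw [← perm_min? _ _ (hperm.map _)]
  have hne : qs ≠ [] := by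
    intro hnil
    rw [hnil] at hperm
    exact h hperm.symm.eq_nil
  have hlen : 0 < qs.length := List.length_pos_iff.mpr hne
  have hpw : List.Pairwise (fun a b => a ≤ b) qs := PySem.List.sorted_pairwise qs0 (fun q => q)
  obtain ⟨hle, hlt, hge⟩ := PySem.List.bisectLeft_spec qs total hpw
  set lo := PySem.List.bisectLeft qs total with hlodef
  have hmono : ∀ (p q : Nat) (hpq : p ≤ q) (hq : q < qs.length), qs[p]'(by omega) ≤ qs[q] := by
    intro p q hpq hq
    exact PySem.List.sorted_id_getElem_mono qs0 hpq hq
  have hv0 : pvPick total qs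
      = (if lo = qs.length then total - PySem.List.pyGetD qs (-1) 0
         else if lo = 0 then PySem.List.pyGetD qs 0 0 - total
         else min (PySem.List.pyGetD qs (lo : Int) 0 - total)
                  (total - PySem.List.pyGetD qs ((lo : Int) - 1) 0)) := rfl
  rw [List.min?_eq_some_iff, hv0]
  by_cases h1 : lo = qs.length
  · -- insertion point past the end: every element is < total, the last is closest
    rw [if_pos h1, getD_neg_one qs hlen]
    constructor
    · refine List.mem_map.mpr ⟨qs[qs.length - 1]'(by omega), List.getElem_mem _, ?_⟩
      have := hlt (qs.length - 1) (by omega) (by omega)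
      rw [abs_of_nonneg (by omega)]
    · intro b hb
      obtain ⟨q, hq, rfl⟩ := List.mem_map.mp hb
      obtain ⟨j, hj, rfl⟩ := List.mem_iff_getElem.mp hq
      have hjlt := hlt j hj (by omega)
      have hmle := hmono j (qs.length - 1) (by omega) (by omega)
      rw [abs_of_nonneg (by omega)]
      omega
  · by_cases h2 : lo = 0
    · -- insertion point at the front: every element is ≥ total, the first is closest
      rw [if_neg h1, if_pos h2]
      rw [show PySem.List.pyGetD qs 0 0 = qs[0] by simpa using getD_nat qs 0 hlen]
      constructor
      · refine List.mem_map.mpr ⟨qs[0], List.getElem_mem _, ?_⟩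
        have := hge 0 hlen (by omega)
        rw [abs_of_nonpos (by omega)]
        ring
      · intro b hb
        obtain ⟨q, hq, rfl⟩ := List.mem_map.mp hb
        obtain ⟨j, hj, rfl⟩ := List.mem_iff_getElem.mp hq
        have hjge := hge j hj (by omega)
        have hmle := hmono 0 j (by omega) hj
        rw [abs_of_nonpos (by omega)]
        omega
    · -- interior insertion point: the answer is the closer of the two neighbours
      have hlolt : lo < qs.length := by omega
      have hlo0 : 0 < lo := by omega
      rw [if_neg h1, if_neg h2, getD_nat qs lo hlolt, getD_pred qs lo hlo0 (by omega)]
      have hup := hge lo hlolt (by omega)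
      have hdown := hlt (lo - 1) (by omega) (by omega)
      constructor
      · rcases le_total (qs[lo] - total) (total - qs[lo - 1]'(by omega)) with hc | hc
        · rw [min_eq_left hc]
          refine List.mem_map.mpr ⟨qs[lo], List.getElem_mem _, ?_⟩
          rw [abs_of_nonpos (by omega)]
          ring
        · rw [min_eq_right hc]
          refine List.mem_map.mpr ⟨qs[lo - 1]'(by omega), List.getElem_mem _, ?_⟩
          rw [abs_of_nonneg (by omega)]
      · intro b hb
        obtain ⟨q, hq, rfl⟩ := List.mem_map.mp hb
        obtain ⟨j, hj, rfl⟩ := List.mem_iff_getElem.mp hq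
        by_cases hjlo : j < lo
        · have hjlt := hlt j hj hjlo
          have hmle := hmono j (lo - 1) (by omega) (by omega)
          rw [abs_of_nonneg (by omega)]
          omega
        · have hjge := hge j hj (by omega)
          have hmle := hmono lo j (by omega) hj
          rw [abs_of_nonpos (by omega)]
          omega

theorem B_char (a : List Int) :
    solution_alt a = (((pvQ a.dropLast 0).map (fun q => |a.sum - q|)).min?).getD |a.sum| := by
  simp only [solution_alt, PySem.List.slice_to_neg_one, pv_build a.dropLast 0 [], List.nil_append]
  by_cases h : pvQ a.dropLast 0 = []
  · simp [h]
  · rw [if_neg h, pick_min a.sum _ h]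
    simp

-- ===== VERDICT (by name: the statement is the Claim_ definition above) =====
theorem solution_spec : Claim_equal_solution := by
  intro a _
  unfold Spec_solution
  rw [A_char, B_char]
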